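-- pv_equiv track=rewrite | github.com/intothefaty/percentage-calculate | Calculate Problems/Password Problem/pwCryptor.py | is_spaced
-- ===== SOURCE A (Python) =====
-- def is_spaced(password,indx=0):
--
--     if(indx+2 == len(password)):
--         return True
--     else:
--         if(abs(ord(password[indx+1]) - ord(password[indx])) != abs(ord(password[indx+2]) - ord(password[indx+1]))):
--             return True and is_spaced(password,indx+1)
--         else:
--             return False
-- ===== SOURCE B (Python) =====
-- def is_spaced(password, indx=0):
--     n = len(password)
--     if indx + 2 == n:
--         return True
--     gaps = [abs(ord(password[indx + 1]) - ord(password[indx]))] + [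
--         abs(ord(password[i + 1]) - ord(password[i])) for i in range(indx + 1, n - 1)
--     ]
--     return all(g != h for g, h in zip(gaps, gaps[1:]))
-- ===== Notes on version B (the rewrite author's own statement) =====
-- stated objective: alternative
-- what changed: A's index-by-index boolean recursion is replaced by two staged passes: first materialise the list of absolute consecutive-character gaps (the first gap seeded, the rest a comprehension), then check that no two adjacent gaps are equal via all() over zip(gaps, gaps[1:]).
import Mathlib
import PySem

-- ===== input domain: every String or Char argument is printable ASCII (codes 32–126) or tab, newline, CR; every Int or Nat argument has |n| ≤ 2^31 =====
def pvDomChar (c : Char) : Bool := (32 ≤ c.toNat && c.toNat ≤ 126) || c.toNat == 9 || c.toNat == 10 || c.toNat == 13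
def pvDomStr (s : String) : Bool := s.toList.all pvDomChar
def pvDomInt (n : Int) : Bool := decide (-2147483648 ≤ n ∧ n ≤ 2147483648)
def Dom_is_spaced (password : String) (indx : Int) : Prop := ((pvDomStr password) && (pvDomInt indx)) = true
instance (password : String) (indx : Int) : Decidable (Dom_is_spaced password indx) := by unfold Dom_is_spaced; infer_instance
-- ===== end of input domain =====

-- B replaces A's boolean recursion by two staged passes: build the list of absolute consecutive
-- gaps once, then check no two adjacent gaps are equal; same O(n) cost, different decomposition.

-- ===== PORT A =====
-- literal port of A's recursion; a `none`/false branch is Python's IndexError (where Python A raises)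
def isSpacedGoA (cs : List Char) (indx : Int) : Bool :=
  if indx + 2 = (cs.length : Int) then
    true
  else
    match hA : PySem.List.pyGet? cs (indx + 2) with
    | none => false  -- IndexError in Python
    | some c2 =>
      match PySem.List.pyGet? cs indx, PySem.List.pyGet? cs (indx + 1) with
      | some c0, some c1 =>
        if ((c1.toNat : Int) - (c0.toNat : Int)).natAbs ≠ ((c2.toNat : Int) - (c1.toNat : Int)).natAbs then
          true && isSpacedGoA cs (indx + 1)
        else
          false
      | _, _ => false  -- IndexError in Python
termination_by ((cs.length : Int) - indx).toNat
decreasing_by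
  have hin : ¬ (PySem.List.pyGet? cs (indx + 2) = none) := by simp [hA]
  rw [PySem.List.pyGet?_eq_none_iff] at hin
  simp [PySem.Raise.InRange] at hin
  omega

def is_spaced (password : String) (indx : Int) : Bool :=
  isSpacedGoA password.toList indx

-- ===== PORT B =====
-- `abs(ord(password[i+1]) - ord(password[i]))`; pyGetD is exact wherever Python B returns
-- (inside Pre_ every index used is in range; on an out-of-range index Python B raises)
def gapAtB (cs : List Char) (i : Int) : Int :=
  (((PySem.List.pyGetD cs (i + 1) ' ').toNat : Int) - ((PySem.List.pyGetD cs i ' ').toNat : Int)).natAbs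

-- `[first gap] + [abs(...) for i in range(indx + 1, n - 1)]`
def gapsB (cs : List Char) (indx : Int) : List Int :=
  gapAtB cs indx :: (PySem.List.pyRange (indx + 1) ((cs.length : Int) - 1) 1).map (gapAtB cs)

-- `all(g != h for g, h in zip(gaps, gaps[1:]))`
def allAdjNeB : List Int → Bool
  | g :: h :: t => (g != h) && allAdjNeB (h :: t)
  | _ => true

def is_spaced_alt (password : String) (indx : Int) : Bool :=
  if indx + 2 = (password.toList.length : Int) then true
  else allAdjNeB (gapsB password.toList indx)

-- ===== PRECONDITION & SPEC =====
-- Pre_ is exactly where Python A returns normally (anywhere else it raises IndexError): either the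
-- terminating index is already reached, or every index the recursion touches is in range.
def Pre_is_spaced (password : String) (indx : Int) : Prop :=
  indx + 2 = (password.toList.length : Int) ∨
    (-(password.toList.length : Int) ≤ indx ∧ indx + 2 ≤ (password.toList.length : Int))
instance (password : String) (indx : Int) : Decidable (Pre_is_spaced password indx) := by
  unfold Pre_is_spaced; infer_instance

def pvWitness_is_spaced : String × Int := ("abc", 0)

def Spec_is_spaced (password : String) (indx : Int) (out : Bool) : Prop := out = is_spaced_alt password indx
instance (password : String) (indx : Int) (out : Bool) : Decidable (Spec_is_spaced password indx out) := by unfold Spec_is_spaced; infer_instance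

-- ===== CLAIM (what is proved, stated in full; the proofs are below) =====
def Claim_equal_is_spaced : Prop := ∀ (password : String) (indx : Int), Dom_is_spaced password indx → Pre_is_spaced password indx → Spec_is_spaced password indx (is_spaced password indx)

-- ===== LEMMAS AND PROOFS =====

lemma pyGetD_eq_of_pyGet? {cs : List Char} {i : Int} {c : Char}
    (h : PySem.List.pyGet? cs i = some c) : PySem.List.pyGetD cs i ' ' = c := by
  simp [PySem.List.pyGetD, h]

lemma goA_eq_adjNe (cs : List Char) (n : Nat) :
    ∀ indx : Int, ((cs.length : Int) - indx).toNat ≤ n →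
      -(cs.length : Int) ≤ indx → indx + 2 ≤ (cs.length : Int) →
      isSpacedGoA cs indx = allAdjNeB (gapsB cs indx) := by
  induction n with
  | zero => intro indx hn hlo hhi; omega
  | succ n ih =>
    intro indx hn hlo hhi
    by_cases heq : indx + 2 = (cs.length : Int)
    · -- terminal step: the gap list is a singleton
      rw [isSpacedGoA, if_pos heq]
      have hr : PySem.List.pyRange (indx + 1) ((cs.length : Int) - 1) 1 = [] :=
        PySem.List.pyRange_one_eq_nil (by omega)
      simp [gapsB, hr, allAdjNeB]
    · -- indx + 2 < cs.length: both sides step once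
      have hlt : indx + 2 < (cs.length : Int) := lt_of_le_of_ne hhi heq
      -- all three accessed indices are in range
      obtain ⟨c0, h0⟩ : ∃ c, PySem.List.pyGet? cs indx = some c := by
        cases h : PySem.List.pyGet? cs indx with
        | none => rw [PySem.List.pyGet?_eq_none_iff] at h; simp [PySem.Raise.InRange] at h; omega
        | some c => exact ⟨c, rfl⟩
      obtain ⟨c1, h1⟩ : ∃ c, PySem.List.pyGet? cs (indx + 1) = some c := by
        cases h : PySem.List.pyGet? cs (indx + 1) with
        | none => rw [PySem.List.pyGet?_eq_none_iff] at h; simp [PySem.Raise.InRange] at h; omega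
        | some c => exact ⟨c, rfl⟩
      obtain ⟨c2, h2⟩ : ∃ c, PySem.List.pyGet? cs (indx + 2) = some c := by
        cases h : PySem.List.pyGet? cs (indx + 2) with
        | none => rw [PySem.List.pyGet?_eq_none_iff] at h; simp [PySem.Raise.InRange] at h; omega
        | some c => exact ⟨c, rfl⟩
      -- the gap list starts with two explicit gaps
      have hcons2 : PySem.List.pyRange (indx + 1) ((cs.length : Int) - 1) 1
          = (indx + 1) :: PySem.List.pyRange (indx + 1 + 1) ((cs.length : Int) - 1) 1 := by
        apply PySem.List.pyRange_one_cons; omega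
      have hg0 : gapAtB cs indx = ((c1.toNat : Int) - (c0.toNat : Int)).natAbs := by
        rw [gapAtB, pyGetD_eq_of_pyGet? h0, pyGetD_eq_of_pyGet? h1]
      have hg1 : gapAtB cs (indx + 1) = ((c2.toNat : Int) - (c1.toNat : Int)).natAbs := by
        rw [gapAtB]
        have : indx + 1 + 1 = indx + 2 := by ring
        rw [this, pyGetD_eq_of_pyGet? h1, pyGetD_eq_of_pyGet? h2]
      have hgl : gapsB cs indx = gapAtB cs indx :: gapsB cs (indx + 1) := by
        rw [gapsB, hcons2, List.map_cons, gapsB]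
      have hgl' : gapsB cs (indx + 1) = gapAtB cs (indx + 1) :: (PySem.List.pyRange (indx + 1 + 1) ((cs.length : Int) - 1) 1).map (gapAtB cs) := by
        rw [gapsB]
      rw [isSpacedGoA, if_neg heq, h2, h0, h1]
      have hrec : isSpacedGoA cs (indx + 1) = allAdjNeB (gapsB cs (indx + 1)) :=
        ih (indx + 1) (by omega) (by omega) (by omega)
      rw [hgl, hgl']
      show (if ((c1.toNat : Int) - (c0.toNat : Int)).natAbs ≠ ((c2.toNat : Int) - (c1.toNat : Int)).natAbs then
              true && isSpacedGoA cs (indx + 1) else false)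
          = allAdjNeB (gapAtB cs indx :: gapAtB cs (indx + 1) :: _)
      rw [allAdjNeB, hg0, hg1]
      by_cases hc : ((c1.toNat : Int) - (c0.toNat : Int)).natAbs = ((c2.toNat : Int) - (c1.toNat : Int)).natAbs
      · simp [hc]
      · rw [if_pos hc, Bool.true_and, hrec, hgl', hg1]
        have hb : ((((((c1.toNat : Int) - (c0.toNat : Int)).natAbs : Nat) : Int)) != (((((c2.toNat : Int) - (c1.toNat : Int)).natAbs : Nat) : Int))) = true := by
          exact bne_iff_ne.mpr (by exact_mod_cast hc)
        rw [hb, Bool.true_and]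

-- ===== VERDICT (by name: the statement is the Claim_ definition above) =====
theorem is_spaced_spec : Claim_equal_is_spaced := by
  intro password indx _ hpre
  unfold Spec_is_spaced is_spaced is_spaced_alt
  by_cases heq : indx + 2 = (password.toList.length : Int)
  · rw [if_pos heq, isSpacedGoA, if_pos heq]
  · rw [if_neg heq]
    rcases hpre with h | ⟨hlo, hhi⟩
    · exact absurd h heq
    · exact goA_eq_adjNe password.toList ((password.toList.length : Int) - indx).toNat indx le_rfl hlo hhi
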